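-- pv_equiv track=rewrite | github.com/KwatMDPhD/ccal | kraft/array.py | map_int
-- ===== SOURCE A (Python) =====
-- def map_int(_1d_array):
--
--     value_to_integer = {}
--
--     integer_to_value = {}
--
--     integer = 0
--
--     for value in _1d_array:
--
--         if value not in value_to_integer:
--
--             value_to_integer[value] = integer
--
--             integer_to_value[integer] = value
--
--             integer += 1
--
--     return value_to_integer, integer_to_value
-- ===== SOURCE B (Python) =====
-- def map_int(_1d_array):
--     # Reverse scan: overwrite so each value ends up mapped to its FIRST index.
--     first = {}
--     for i, v in reversed(list(enumerate(_1d_array))):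
--         first[v] = i
--     # Sort the first-occurrence indices and read the values back in that order.
--     uniq = [_1d_array[i] for i in sorted(first.values())]
--     pairs = list(zip(uniq, range(len(uniq))))
--     return dict(pairs), dict((i, v) for v, i in pairs)
-- ===== Notes on version B (the rewrite author's own statement) =====
-- stated objective: alternative
-- what changed: Replaced A's forward pass with dict-membership test and running counter by a reverse scan that overwrites a value->first-index dict, then sorting those first indices and reading the distinct values back, pairing them with a range via zip.
import Mathlib
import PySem

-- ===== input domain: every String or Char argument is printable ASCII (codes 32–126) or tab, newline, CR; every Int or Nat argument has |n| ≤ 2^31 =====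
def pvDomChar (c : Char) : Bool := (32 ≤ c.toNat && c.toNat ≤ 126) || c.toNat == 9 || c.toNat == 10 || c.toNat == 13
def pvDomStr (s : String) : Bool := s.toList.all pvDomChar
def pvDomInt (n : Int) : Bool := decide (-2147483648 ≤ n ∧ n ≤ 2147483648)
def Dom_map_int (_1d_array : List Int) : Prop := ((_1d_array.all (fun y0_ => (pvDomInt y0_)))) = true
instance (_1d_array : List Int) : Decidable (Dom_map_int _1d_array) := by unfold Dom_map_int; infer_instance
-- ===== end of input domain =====

-- B: reverse scan overwriting a first-index dict, sort those first indices, read the values back,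
-- zip with a range — a different decomposition of the same mapping (objective: alternative).

-- ===== PORT A =====
-- A's for-loop over the array, carrying the two dicts and the counter.
def mapIntLoop : List Int → PySem.Dict Int Int → PySem.Dict Int Int → Int →
    PySem.Dict Int Int × PySem.Dict Int Int
  | [], d1, d2, _ => (d1, d2)
  | v :: rest, d1, d2, n =>
    if d1.contains v then mapIntLoop rest d1 d2 n
    else mapIntLoop rest (d1.insert v n) (d2.insert n v) (n + 1)

def map_int (_1d_array : List Int) : (List (Int × Int)) × (List (Int × Int)) :=
  let r := mapIntLoop _1d_array PySem.Dict.empty PySem.Dict.empty 0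
  (r.1.items, r.2.items)

-- ===== PORT B =====
-- first[v] = i over reversed(enumerate(xs)); uniq = [xs[i] for i in sorted(first.values())]
-- (every i comes from enumerate, so xs[i] is always in range: pyGetD's default is never read);
-- the two dict(...) constructions are folds of insert over pairs = zip(uniq, range(len(uniq))).
def map_int_alt (_1d_array : List Int) : (List (Int × Int)) × (List (Int × Int)) :=
  let first := (PySem.List.enumerate _1d_array 0).reverse.foldl
    (fun d p => d.insert p.2 p.1) PySem.Dict.empty
  let uniq := (PySem.List.sorted first.values (fun x => x) false).map
    (fun i => PySem.List.pyGetD _1d_array i 0)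
  let pairs := uniq.zip (PySem.List.pyRange 0 (uniq.length : Int) 1)
  let value_to_integer := pairs.foldl (fun d p => d.insert p.1 p.2) PySem.Dict.empty
  let integer_to_value := pairs.foldl (fun d p => d.insert p.2 p.1) PySem.Dict.empty
  (value_to_integer.items, integer_to_value.items)

-- ===== PRECONDITION & SPEC =====
def Spec_map_int (_1d_array : List Int) (out : (List (Int × Int)) × (List (Int × Int))) : Prop := out = map_int_alt _1d_array
instance (_1d_array : List Int) (out : (List (Int × Int)) × (List (Int × Int))) : Decidable (Spec_map_int _1d_array out) := by unfold Spec_map_int; infer_instance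

-- ===== CLAIM (what is proved, stated in full; the proofs are below) =====
def Claim_equal_map_int : Prop := ∀ (_1d_array : List Int), Dom_map_int _1d_array → Spec_map_int _1d_array (map_int _1d_array)

-- ===== LEMMAS AND PROOFS =====

-- the foldr form of B's reversed prepend-and-filter loop
def nubF (xs : List Int) : List Int :=
  xs.foldr (fun x acc => x :: acc.filter (fun v => decide (v ≠ x))) []

theorem update_eq_append_nubF (xs u : List Int) :
    PySem.Set.update u xs = u ++ (nubF xs).filter (fun v => decide (v ∉ u)) := by
  induction xs generalizing u with
  | nil => simp [PySem.Set.update, nubF]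
  | cons x rest ih =>
    have hupd : PySem.Set.update u (x :: rest) = PySem.Set.update (PySem.Set.add u x) rest := by
      simp [PySem.Set.update]
    rw [hupd, ih]
    by_cases hx : x ∈ u
    · have hadd : PySem.Set.add u x = u := by
        simp [PySem.Set.add, PySem.Set.contains, hx]
      rw [hadd]
      congr 1
      simp only [nubF, List.foldr_cons, List.filter_cons]
      have hxf : (decide (x ∉ u)) = false := by simp [hx]
      rw [hxf]
      simp only [Bool.false_eq_true, if_false, List.filter_filter]
      apply List.filter_congr
      intro a _
      by_cases ha : a ∈ u
      · simp [ha]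
      · have hax : a ≠ x := fun h => ha (h ▸ hx)
        simp [ha, hax]
    · have hadd : PySem.Set.add u x = u ++ [x] := by
        simp [PySem.Set.add, PySem.Set.contains, hx]
      rw [hadd, List.append_assoc]
      congr 1
      simp only [nubF, List.foldr_cons, List.filter_cons]
      have hxt : (decide (x ∉ u)) = true := by simp [hx]
      rw [hxt]
      simp only [if_true, List.singleton_append, List.filter_filter]
      congr 1
      apply List.filter_congr
      intro a _
      by_cases hax : a = x
      · simp [hax]
      · simp [hax, List.mem_append]

theorem nubF_eq_dedup (xs : List Int) : nubF xs = PySem.List.dedup xs := by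
  have h := update_eq_append_nubF xs []
  simp only [List.nil_append] at h
  rw [PySem.List.dedup_eq_ofList]
  have : PySem.Set.ofList xs = PySem.Set.update [] xs := by
    simp [PySem.Set.ofList_eq_foldl, PySem.Set.update]
  rw [this, h]
  simp

-- first-occurrence index facts
theorem mem_nubF (xs : List Int) (a : Int) : a ∈ nubF xs ↔ a ∈ xs := by
  rw [nubF_eq_dedup]; exact PySem.List.mem_dedup xs a

theorem nubF_pairwise_idxOf (xs : List Int) :
    (nubF xs).Pairwise (fun a b => List.idxOf a xs < List.idxOf b xs) := by
  induction xs with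
  | nil => simp [nubF]
  | cons x rest ih =>
    have hstep : nubF (x :: rest) = x :: (nubF rest).filter (fun v => decide (v ≠ x)) := rfl
    rw [hstep]
    refine List.Pairwise.cons ?_ ?_
    · intro b hb
      have hbx : b ≠ x := by
        have := List.of_mem_filter hb
        simpa using this
      have hxb : (x == b) = false := by simp [Ne.symm hbx]
      simp [List.idxOf_cons, hxb]
    · have hpf : ((nubF rest).filter (fun v => decide (v ≠ x))).Pairwise
          (fun a b => List.idxOf a rest < List.idxOf b rest) :=
        (ih.filter _)
      refine List.Pairwise.imp_of_mem ?_ hpf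
      intro a b ha hb hlt
      have hax : a ≠ x := by simpa using List.of_mem_filter ha
      have hbx : b ≠ x := by simpa using List.of_mem_filter hb
      have hxa : (x == a) = false := by simp [Ne.symm hax]
      have hxb : (x == b) = false := by simp [Ne.symm hbx]
      simp [List.idxOf_cons, hxa, hxb]
      omega

theorem first_get? (xs : List Int) (s : Int) (v : Int) :
    ((PySem.List.enumerate xs s).reverse.foldl
        (fun d p => d.insert p.2 p.1) PySem.Dict.empty).get? v
      = if v ∈ xs then some (s + (List.idxOf v xs : Int)) else none := by
  induction xs generalizing s with
  | nil => simp [PySem.List.enumerate_nil, PySem.Dict.get?_empty]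
  | cons x rest ih =>
    have hrev : (PySem.List.enumerate (x :: rest) s).reverse
        = (PySem.List.enumerate rest (s + 1)).reverse ++ [(s, x)] := by
      rw [PySem.List.enumerate_cons, List.reverse_cons]
    rw [hrev, List.foldl_append]
    simp only [List.foldl_cons, List.foldl_nil]
    rw [PySem.Dict.get?_insert]
    by_cases hvx : v = x
    · subst hvx
      simp
    · rw [if_neg hvx, ih (s + 1)]
      have hxv : (x == v) = false := by simp [Ne.symm (fun h => hvx h)]
      by_cases hvr : v ∈ rest
      · have : List.idxOf v (x :: rest) = List.idxOf v rest + 1 := by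
          simp [List.idxOf_cons, hxv]
        simp [hvr, hvx, this]
        omega
      · simp [hvr, hvx]

theorem first_sorted_values (xs : List Int) :
    PySem.List.sorted
        ((PySem.List.enumerate xs 0).reverse.foldl
          (fun d p => d.insert p.2 p.1) PySem.Dict.empty).values (fun x => x) false
      = (nubF xs).map (fun v => (List.idxOf v xs : Int)) := by
  set first := (PySem.List.enumerate xs 0).reverse.foldl
    (fun d p => d.insert p.2 p.1) PySem.Dict.empty with hfirst
  have hkeysnd : ((PySem.List.enumerate xs 0).reverse.map (fun p : Int × Int => p.2)) = xs.reverse := by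
    rw [List.map_reverse, PySem.List.map_snd_enumerate]
  have hkeys : first.keys = PySem.List.dedup xs.reverse := by
    rw [hfirst]
    have := PySem.Dict.keys_foldl_insert_key
      (l := (PySem.List.enumerate xs 0).reverse) (key := fun p : Int × Int => p.2)
      (f := fun _ p => p.1) (d := PySem.Dict.empty)
    rw [this, hkeysnd]
    have he : (PySem.Dict.empty : PySem.Dict Int Int).keys = [] := rfl
    rw [he, PySem.List.dedup_eq_ofList, PySem.Set.ofList_eq_foldl]
    rfl
  have hnodup : first.keys.Nodup := by
    rw [hkeys]; exact PySem.List.nodup_dedup _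
  have hvals : first.values = first.keys.map (fun k => first.getD k 0) :=
    PySem.Dict.values_eq_map_keys first hnodup 0
  have hgetD : ∀ v ∈ xs, first.getD v 0 = (List.idxOf v xs : Int) := by
    intro v hv
    have := first_get? xs 0 v
    rw [← hfirst] at this
    rw [PySem.Dict.getD_eq_get?_getD, this, if_pos hv]
    simp
  have hvals' : first.values = (PySem.List.dedup xs.reverse).map (fun v => (List.idxOf v xs : Int)) := by
    rw [hvals, hkeys]
    apply List.map_congr_left
    intro v hv
    exact hgetD v (by
      have : v ∈ xs.reverse := (PySem.List.mem_dedup xs.reverse v).mp hv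
      simpa using this)
  -- the target listing is a strictly increasing rearrangement of the values
  have hperm : ((nubF xs).map (fun v => (List.idxOf v xs : Int))).Perm first.values := by
    rw [hvals']
    apply List.Perm.map
    apply (List.perm_ext_iff_of_nodup _ _).mpr
    · intro a
      rw [mem_nubF, PySem.List.mem_dedup]
      simp
    · rw [nubF_eq_dedup]; exact PySem.List.nodup_dedup _
    · exact PySem.List.nodup_dedup _
  have hpw : ((nubF xs).map (fun v => (List.idxOf v xs : Int))).Pairwise
      (fun a b => a < b) := by
    rw [List.pairwise_map]
    refine (nubF_pairwise_idxOf xs).imp ?_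
    intro a b h
    exact_mod_cast h
  exact PySem.List.sorted_eq_of_perm_of_pairwise_lt _ _ _ hperm hpw

theorem map_pyGetD_nubF_idxOf (xs : List Int) :
    ((nubF xs).map (fun v => (List.idxOf v xs : Int))).map
        (fun i => PySem.List.pyGetD xs i 0) = PySem.List.dedup xs := by
  rw [List.map_map, ← nubF_eq_dedup]
  conv_rhs => rw [← List.map_id (nubF xs)]
  apply List.map_congr_left
  intro v hv
  have hvxs : v ∈ xs := (mem_nubF xs v).mp hv
  have hlt : List.idxOf v xs < xs.length := List.idxOf_lt_length_of_mem hvxs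
  simp only [Function.comp_def, id_eq]
  rw [PySem.List.pyGetD_natCast]
  simp [List.getD_eq_getElem?_getD, List.getElem?_eq_getElem hlt]

theorem zip_pyRange_eq_enumerate (xs : List Int) (s : Int) :
    xs.zip (PySem.List.pyRange s (s + (xs.length : Int)) 1)
      = (PySem.List.enumerate xs s).map (fun p => (p.2, p.1)) := by
  induction xs generalizing s with
  | nil => simp [PySem.List.pyRange, PySem.List.enumerate_nil]
  | cons x rest ih =>
    have hlt : s < s + ((x :: rest).length : Int) := by
      have h0 : (0 : Int) < ((x :: rest).length : Int) := by
        exact_mod_cast Nat.succ_pos rest.length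
      omega
    rw [PySem.List.pyRange_one_cons hlt]
    have : s + ((x :: rest).length : Int) = (s + 1) + (rest.length : Int) := by
      simp; ring
    rw [this]
    simp [List.zip_cons_cons, PySem.List.enumerate_cons, ih (s + 1)]

theorem enumerate_append_singleton (u : List Int) (v : Int) (s : Int) :
    PySem.List.enumerate (u ++ [v]) s = PySem.List.enumerate u s ++ [(s + u.length, v)] := by
  induction u generalizing s with
  | nil => simp [PySem.List.enumerate_cons, PySem.List.enumerate_nil]
  | cons x xs ih =>
    simp [PySem.List.enumerate_cons, ih]
    ring_nf

theorem mapIntLoop_spec (xs : List Int) (u : List Int) (d1 d2 : PySem.Dict Int Int)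
    (hu : u.Nodup)
    (h1 : d1.items = (PySem.List.enumerate u 0).map (fun p => (p.2, p.1)))
    (h2 : d2.items = PySem.List.enumerate u 0) :
    (mapIntLoop xs d1 d2 (u.length : Int)).1.items
        = (PySem.List.enumerate (PySem.Set.update u xs) 0).map (fun p => (p.2, p.1)) ∧
    (mapIntLoop xs d1 d2 (u.length : Int)).2.items
        = PySem.List.enumerate (PySem.Set.update u xs) 0 := by
  induction xs generalizing u d1 d2 with
  | nil => simpa [mapIntLoop, PySem.Set.update] using ⟨h1, h2⟩
  | cons v rest ih =>
    have hkeys1 : d1.keys = u := by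
      simp only [PySem.Dict.keys, h1, List.map_map, Function.comp_def]
      exact PySem.List.map_snd_enumerate u 0
    have hc1 : d1.contains v = decide (v ∈ u) := by
      rw [PySem.Dict.contains_eq_decide_mem_keys, hkeys1]
    rw [PySem.Set.update_cons]
    by_cases hv : v ∈ u
    · have hadd : PySem.Set.add u v = u := by
        simp [PySem.Set.add, PySem.Set.contains, hv]
      rw [hadd]
      have : mapIntLoop (v :: rest) d1 d2 (u.length : Int) = mapIntLoop rest d1 d2 (u.length : Int) := by
        simp [mapIntLoop, hc1, hv]
      rw [this]
      exact ih u d1 d2 hu h1 h2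
    · have hadd : PySem.Set.add u v = u ++ [v] := by
        simp [PySem.Set.add, PySem.Set.contains, hv]
      rw [hadd]
      have hstep : mapIntLoop (v :: rest) d1 d2 (u.length : Int)
          = mapIntLoop rest (d1.insert v (u.length : Int)) (d2.insert (u.length : Int) v)
              ((u.length : Int) + 1) := by
        simp [mapIntLoop, hc1, hv]
      rw [hstep]
      have hnodup' : (u ++ [v]).Nodup :=
        List.Nodup.append hu (List.nodup_singleton v)
          (by simpa [List.disjoint_singleton] using hv)
      have hlen : ((u ++ [v]).length : Int) = (u.length : Int) + 1 := by
        simp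
      have hc1' : d1.contains v = false := by simp [hc1, hv]
      have h1' : (d1.insert v (u.length : Int)).items
          = (PySem.List.enumerate (u ++ [v]) 0).map (fun p => (p.2, p.1)) := by
        rw [PySem.Dict.items_insert_of_not_contains _ _ hc1', h1,
          enumerate_append_singleton]
        simp
      have hkeys2 : d2.keys = PySem.List.pyRange 0 (u.length : Int) 1 := by
        simp only [PySem.Dict.keys, h2]
        simpa using PySem.List.map_fst_enumerate u 0
      have hc2 : d2.contains (u.length : Int) = false := by
        rw [PySem.Dict.contains_eq_decide_mem_keys, hkeys2]
        simp [PySem.List.mem_pyRange_one]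
      have h2' : (d2.insert (u.length : Int) v).items = PySem.List.enumerate (u ++ [v]) 0 := by
        rw [PySem.Dict.items_insert_of_not_contains _ _ hc2, h2,
          enumerate_append_singleton]
        simp
      have := ih (u ++ [v]) (d1.insert v (u.length : Int)) (d2.insert (u.length : Int) v)
        hnodup' h1' h2'
      rwa [hlen] at this

theorem map_int_eq_alt (xs : List Int) : map_int xs = map_int_alt xs := by
  have h := mapIntLoop_spec xs [] PySem.Dict.empty PySem.Dict.empty
    (by simp) (by simp [PySem.Dict.empty, PySem.List.enumerate_nil]) (by simp [PySem.Dict.empty, PySem.List.enumerate_nil])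
  have hupd : PySem.Set.update [] xs = PySem.List.dedup xs := by
    simp [PySem.Set.update_nil_left]
  simp only [List.length_nil, Nat.cast_zero, hupd] at h
  -- B side
  have huniq : (PySem.List.sorted
        ((PySem.List.enumerate xs 0).reverse.foldl
          (fun d p => d.insert p.2 p.1) PySem.Dict.empty).values (fun x => x) false).map
        (fun i => PySem.List.pyGetD xs i 0) = PySem.List.dedup xs := by
    rw [first_sorted_values, map_pyGetD_nubF_idxOf]
  have hpairs : (PySem.List.dedup xs).zip
      (PySem.List.pyRange 0 ((PySem.List.dedup xs).length : Int) 1)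
      = (PySem.List.enumerate (PySem.List.dedup xs) 0).map (fun p => (p.2, p.1)) := by
    have := zip_pyRange_eq_enumerate (PySem.List.dedup xs) 0
    simpa using this
  have hfresh1 : (((PySem.List.enumerate (PySem.List.dedup xs) 0).map (fun p => (p.2, p.1))).foldl
      (fun d p => d.insert p.1 p.2) PySem.Dict.empty).items
      = (PySem.List.enumerate (PySem.List.dedup xs) 0).map (fun p => (p.2, p.1)) := by
    have := PySem.Dict.items_foldl_insert_fresh (d := PySem.Dict.empty)
      (l := (PySem.List.enumerate (PySem.List.dedup xs) 0).map (fun p => (p.2, p.1)))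
      (k := fun p : Int × Int => p.1) (v := fun p : Int × Int => p.2)
      (by intro a _; simp) (by
        rw [List.map_map]
        have : ((fun p : Int × Int => p.1) ∘ fun p : Int × Int => (p.2, p.1))
            = fun p : Int × Int => p.2 := rfl
        rw [this, PySem.List.map_snd_enumerate]
        exact PySem.List.nodup_dedup xs)
    simpa [List.map_map, Function.comp_def, PySem.Dict.empty] using this
  have hfresh2 : (((PySem.List.enumerate (PySem.List.dedup xs) 0).map (fun p => (p.2, p.1))).foldl
      (fun d p => d.insert p.2 p.1) PySem.Dict.empty).items
      = PySem.List.enumerate (PySem.List.dedup xs) 0 := by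
    have := PySem.Dict.items_foldl_insert_fresh (d := PySem.Dict.empty)
      (l := (PySem.List.enumerate (PySem.List.dedup xs) 0).map (fun p => (p.2, p.1)))
      (k := fun p : Int × Int => p.2) (v := fun p : Int × Int => p.1)
      (by intro a _; simp) (by
        rw [List.map_map]
        have : ((fun p : Int × Int => p.2) ∘ fun p : Int × Int => (p.2, p.1))
            = fun p : Int × Int => p.1 := rfl
        rw [this, PySem.List.map_fst_enumerate]
        exact PySem.List.nodup_pyRange_one _ _)
    simpa [List.map_map, Function.comp_def, PySem.Dict.empty] using this
  simp only [map_int, map_int_alt, huniq, hpairs]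
  rw [hfresh1, hfresh2, h.1, h.2]

-- ===== VERDICT (by name: the statement is the Claim_ definition above) =====
theorem map_int_spec : Claim_equal_map_int := by
  intro xs _
  unfold Spec_map_int
  exact map_int_eq_alt xs
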